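-- pv_equiv track=rewrite | github.com/palchhinparihar/codedex-daily-challenge | code/day10.py | minimum_components
-- ===== SOURCE A (Python) =====
-- def minimum_components(components):
--   # Round 1 - single items
--   for num in components:
--     if num == 42:
--       return 1
--
--   # Round 2 - pairs
--   for num1 in components:
--     for num2 in components:
--         if num1 + num2 == 42:
--           return 2
--
--   # Round 3 - triplets
--   for num1 in components:
--     for num2 in components:
--       for num3 in components:
--         if num1 + num2 + num3 == 42:
--           return 3
--
--   return -1
-- ===== SOURCE B (Python) =====
-- def minimum_components(components):
--     # one set + membership checks: O(n) for singles/pairs, O(n^2) for triplets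
--     s = set(components)
--     if 42 in s:
--         return 1
--     if any(42 - a in s for a in s):
--         return 2
--     if any(42 - a - b in s for a in s for b in s):
--         return 3
--     return -1
-- ===== Notes on version B (the rewrite author's own statement) =====
-- stated objective: faster
-- what changed: Replaces the early-return nested O(n^3) scans with a single set of the elements and membership tests (42 in s; 42-a in s; 42-a-b in s), dropping one loop level from each round.
import Mathlib
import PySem

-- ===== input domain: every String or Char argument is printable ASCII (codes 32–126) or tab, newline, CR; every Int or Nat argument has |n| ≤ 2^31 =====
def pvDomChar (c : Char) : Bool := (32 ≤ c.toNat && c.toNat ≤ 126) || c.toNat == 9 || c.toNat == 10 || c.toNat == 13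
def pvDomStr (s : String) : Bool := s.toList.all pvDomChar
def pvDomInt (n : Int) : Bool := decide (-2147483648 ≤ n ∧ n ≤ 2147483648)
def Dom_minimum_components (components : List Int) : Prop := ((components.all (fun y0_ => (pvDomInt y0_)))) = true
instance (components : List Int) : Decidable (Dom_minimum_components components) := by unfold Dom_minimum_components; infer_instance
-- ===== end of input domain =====

-- B replaces A's nested membership scans with one set and O(1) membership tests (faster, asymptotic).

-- ===== PORT A =====
-- Round 1: for num in components: if num == 42: return 1
def aRound1 : List Int → Option Int
  | [] => none
  | n :: ns => if n = 42 then some 1 else aRound1 ns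

-- Round 2 inner loop: for num2 in components: if num1 + num2 == 42: return 2
def aInner2 (n1 : Int) : List Int → Option Int
  | [] => none
  | n2 :: ns => if n1 + n2 = 42 then some 2 else aInner2 n1 ns

-- Round 2 outer loop
def aRound2 (l : List Int) : List Int → Option Int
  | [] => none
  | n1 :: ns =>
    match aInner2 n1 l with
    | some r => some r
    | none => aRound2 l ns

-- Round 3 innermost loop
def aInner3 (n1 n2 : Int) : List Int → Option Int
  | [] => none
  | n3 :: ns => if n1 + n2 + n3 = 42 then some 3 else aInner3 n1 n2 ns

-- Round 3 middle loop
def aMid3 (l : List Int) (n1 : Int) : List Int → Option Int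
  | [] => none
  | n2 :: ns =>
    match aInner3 n1 n2 l with
    | some r => some r
    | none => aMid3 l n1 ns

-- Round 3 outer loop
def aRound3 (l : List Int) : List Int → Option Int
  | [] => none
  | n1 :: ns =>
    match aMid3 l n1 l with
    | some r => some r
    | none => aRound3 l ns

def minimum_components (components : List Int) : Int :=
  match aRound1 components with
  | some r => r
  | none =>
    match aRound2 components components with
    | some r => r
    | none =>
      match aRound3 components components with
      | some r => r
      | none => -1

-- ===== PORT B =====
-- s = set(components)
def bSet (components : List Int) : PySem.Set Int := PySem.Set.ofList components

def minimum_components_alt (components : List Int) : Int :=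
  if PySem.Set.contains (bSet components) 42 then 1
  else if (bSet components).any (fun a => PySem.Set.contains (bSet components) (42 - a)) then 2
  else if (bSet components).any (fun a => (bSet components).any (fun b => PySem.Set.contains (bSet components) (42 - a - b))) then 3
  else -1

-- ===== PRECONDITION & SPEC =====
def Spec_minimum_components (components : List Int) (out : Int) : Prop := out = minimum_components_alt components
instance (components : List Int) (out : Int) : Decidable (Spec_minimum_components components out) := by unfold Spec_minimum_components; infer_instance

-- ===== CLAIM (what is proved, stated in full; the proofs are below) =====
def Claim_equal_minimum_components : Prop := ∀ (components : List Int), Dom_minimum_components components → Spec_minimum_components components (minimum_components components)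

-- ===== LEMMAS AND PROOFS =====

theorem aRound1_eq (l : List Int) :
    aRound1 l = if l.any (fun n => n == 42) then some 1 else none := by
  induction l with
  | nil => simp [aRound1]
  | cons n ns ih => by_cases h : n = 42 <;> simp [aRound1, h, ih]

theorem aInner2_eq (n1 : Int) (l : List Int) :
    aInner2 n1 l = if l.any (fun n2 => n1 + n2 == 42) then some 2 else none := by
  induction l with
  | nil => simp [aInner2]
  | cons n ns ih => by_cases h : n1 + n = 42 <;> simp [aInner2, h, ih]

theorem aRound2_eq (l m : List Int) :
    aRound2 l m = if m.any (fun n1 => l.any (fun n2 => n1 + n2 == 42)) then some 2 else none := by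
  induction m with
  | nil => simp [aRound2]
  | cons n ns ih =>
    simp only [aRound2, aInner2_eq, List.any_cons]
    by_cases h : l.any (fun n2 => n + n2 == 42) <;> simp [h, ih]

theorem aInner3_eq (n1 n2 : Int) (l : List Int) :
    aInner3 n1 n2 l = if l.any (fun n3 => n1 + n2 + n3 == 42) then some 3 else none := by
  induction l with
  | nil => simp [aInner3]
  | cons n ns ih => by_cases h : n1 + n2 + n = 42 <;> simp [aInner3, h, ih]

theorem aMid3_eq (l : List Int) (n1 : Int) (m : List Int) :
    aMid3 l n1 m = if m.any (fun n2 => l.any (fun n3 => n1 + n2 + n3 == 42)) then some 3 else none := by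
  induction m with
  | nil => simp [aMid3]
  | cons n ns ih =>
    simp only [aMid3, aInner3_eq, List.any_cons]
    by_cases h : l.any (fun n3 => n1 + n + n3 == 42) <;> simp [h, ih]

theorem aRound3_eq (l m : List Int) :
    aRound3 l m = if m.any (fun n1 => l.any (fun n2 => l.any (fun n3 => n1 + n2 + n3 == 42))) then some 3 else none := by
  induction m with
  | nil => simp [aRound3]
  | cons n ns ih =>
    simp only [aRound3, aMid3_eq, List.any_cons]
    by_cases h : l.any (fun n2 => l.any (fun n3 => n + n2 + n3 == 42)) <;> simp [h, ih]

theorem cond1_eq (l : List Int) :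
    PySem.Set.contains (PySem.Set.ofList l) 42 = l.any (fun n => n == 42) := by
  rw [Bool.eq_iff_iff]
  simp only [List.any_eq_true, PySem.Set.contains_iff, PySem.Set.mem_ofList, beq_iff_eq]
  constructor
  · intro h; exact ⟨42, h, rfl⟩
  · rintro ⟨x, hx, rfl⟩; exact hx

theorem cond2_eq (l : List Int) :
    (PySem.Set.ofList l).any (fun a => PySem.Set.contains (PySem.Set.ofList l) (42 - a)) =
      l.any (fun n1 => l.any (fun n2 => n1 + n2 == 42)) := by
  rw [Bool.eq_iff_iff]
  simp only [List.any_eq_true, PySem.Set.contains_iff, PySem.Set.mem_ofList, beq_iff_eq]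
  constructor
  · rintro ⟨a, ha, hb⟩; exact ⟨a, ha, 42 - a, hb, by ring⟩
  · rintro ⟨a, ha, b, hb, hab⟩; refine ⟨a, ha, ?_⟩; have : 42 - a = b := by omega
    rw [this]; exact hb

theorem cond3_eq (l : List Int) :
    (PySem.Set.ofList l).any (fun a => (PySem.Set.ofList l).any (fun b =>
        PySem.Set.contains (PySem.Set.ofList l) (42 - a - b))) =
      l.any (fun n1 => l.any (fun n2 => l.any (fun n3 => n1 + n2 + n3 == 42))) := by
  rw [Bool.eq_iff_iff]
  simp only [List.any_eq_true, PySem.Set.contains_iff, PySem.Set.mem_ofList, beq_iff_eq]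
  constructor
  · rintro ⟨a, ha, b, hb, hc⟩; exact ⟨a, ha, b, hb, 42 - a - b, hc, by ring⟩
  · rintro ⟨a, ha, b, hb, c, hc, habc⟩
    refine ⟨a, ha, b, hb, ?_⟩; have : 42 - a - b = c := by omega
    rw [this]; exact hc

-- ===== VERDICT (by name: the statement is the Claim_ definition above) =====
theorem minimum_components_spec : Claim_equal_minimum_components := by
  intro l _
  unfold Spec_minimum_components minimum_components minimum_components_alt bSet
  rw [aRound1_eq, aRound2_eq, aRound3_eq, cond1_eq, cond2_eq, cond3_eq]
  split_ifs <;> simp_all
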